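-- pv_equiv track=rewrite | github.com/824zzy/Leetcode | A_Basic/Simulation/L0_3847_Find_the_Score_Difference_in_a_Game.py | scoreDifference
-- ===== SOURCE A (Python) =====
-- from typing import List
--
-- def scoreDifference(A: List[int]) -> int:
--     active = 0
--     scores = [0, 0]
--     for i in range(len(A)):
--         if A[i] & 1:
--             active ^= 1
--         if (i + 1) % 6 == 0:
--             active ^= 1
--         scores[active] += A[i]
--     return scores[0] - scores[1]
-- ===== SOURCE B (Python) =====
-- from typing import List
--
-- def scoreDifference(A: List[int]) -> int:
--     # staged: materialise the prefix odd-counts, then sum signed terms via (-1)**k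
--     n = len(A)
--     pref = []
--     c = 0
--     for x in A:
--         c += x & 1
--         pref.append(c)
--     return sum(A[i] * (-1) ** (pref[i] + (i + 1) // 6) for i in range(n))
-- ===== Notes on version B (the rewrite author's own statement) =====
-- stated objective: alternative
-- what changed: Replaces A's stateful single pass (XOR toggle bit plus two-element bucket list) with staged passes: first materialise the list of prefix odd-counts, then sum per-index terms signed by the power (-1)**(pref[i] + (i+1)//6).
import Mathlib
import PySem

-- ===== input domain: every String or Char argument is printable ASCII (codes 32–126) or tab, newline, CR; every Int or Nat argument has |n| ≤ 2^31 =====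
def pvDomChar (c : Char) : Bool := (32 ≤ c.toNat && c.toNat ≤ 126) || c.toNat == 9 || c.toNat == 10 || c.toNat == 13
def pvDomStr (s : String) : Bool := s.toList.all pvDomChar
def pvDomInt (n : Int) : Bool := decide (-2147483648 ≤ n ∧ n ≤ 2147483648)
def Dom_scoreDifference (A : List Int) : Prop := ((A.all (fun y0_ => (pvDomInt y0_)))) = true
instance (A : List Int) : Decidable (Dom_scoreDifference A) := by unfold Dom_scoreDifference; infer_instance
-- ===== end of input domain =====

-- B replaces A's XOR-toggle/bucket-list single pass by staged passes: a materialised prefix odd-count list,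
-- then a sum of terms signed by the power (-1)**(pref[i] + (i+1)//6) (alternative decomposition, same cost).


-- ===== PORT A =====
-- one loop step of A: toggle on odd A[i], toggle when (i+1)%6==0, add A[i] to scores[active]
def pvStepA (st : Int × List Int) (i : Int) (a : Int) : Int × List Int :=
  let active := st.1
  let scores := st.2
  let active := if PySem.Int.band a 1 ≠ 0 then PySem.Int.bxor active 1 else active
  let active := if PySem.Int.mod (i + 1) 6 = 0 then PySem.Int.bxor active 1 else active
  (active, PySem.List.pySetD scores active (PySem.List.pyGetD scores active 0 + a))

def scoreDifference (A : List Int) : Int :=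
  let st := (PySem.List.pyRange 0 (PySem.List.len A) 1).foldl
    (fun st i => pvStepA st i (PySem.List.pyGetD A i 0)) (0, [0, 0])
  PySem.List.pyGetD st.2 0 0 - PySem.List.pyGetD st.2 1 0

-- ===== PORT B =====
-- (-1) ** e : the exponent pref[i] + (i+1)//6 is always ≥ 0 here, so .toNat is exact to Python's int pow
def scoreDifference_alt (A : List Int) : Int :=
  let n := PySem.List.len A
  let pref := (A.foldl (fun (st : Int × List Int) x =>
      (st.1 + PySem.Int.band x 1, st.2 ++ [st.1 + PySem.Int.band x 1])) (0, [])).2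
  (PySem.List.pyRange 0 n 1).foldl
    (fun acc i => acc + PySem.List.pyGetD A i 0 *
      (-1 : Int) ^ (PySem.List.pyGetD pref i 0 + PySem.Int.floordiv (i + 1) 6).toNat) 0

-- ===== PRECONDITION & SPEC =====
def Spec_scoreDifference (A : List Int) (out : Int) : Prop := out = scoreDifference_alt A
instance (A : List Int) (out : Int) : Decidable (Spec_scoreDifference A out) := by unfold Spec_scoreDifference; infer_instance

-- ===== CLAIM (what is proved, stated in full; the proofs are below) =====
def Claim_equal_scoreDifference : Prop := ∀ (A : List Int), Dom_scoreDifference A → Spec_scoreDifference A (scoreDifference A)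

-- ===== LEMMAS AND PROOFS =====

-- common recursive specification: signed sum with running position s and running odd-count c
def pvG (s c : Int) : List Int → Int
  | [] => 0
  | x :: xs =>
    x * (-1 : Int) ^ (c + PySem.Int.band x 1 + PySem.Int.floordiv (s + 1) 6).toNat
      + pvG (s + 1) (c + PySem.Int.band x 1) xs

-- the prefix odd-count list B materialises, as a structural recursion
def pvPrefAux (c : Int) : List Int → List Int
  | [] => []
  | x :: xs => (c + PySem.Int.band x 1) :: pvPrefAux (c + PySem.Int.band x 1) xs

theorem pv_sign_of_nonneg (k : Int) (hk : 0 ≤ k) :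
    (-1 : Int) ^ k.toNat = if PySem.Int.mod k 2 = 0 then 1 else -1 := by
  obtain ⟨n, rfl⟩ := Int.eq_ofNat_of_zero_le hk
  rw [PySem.Int.mod_eq_emod_of_pos (by norm_num), Int.toNat_natCast]
  rcases Nat.even_or_odd n with h | h
  · have h2 := Nat.even_iff.mp h
    rw [h.neg_one_pow, if_pos (by omega)]
  · have h2 := Nat.odd_iff.mp h
    rw [h.neg_one_pow, if_neg (by omega)]

-- A-side invariant: active is the parity (c + s//6) % 2 and the fold accumulates pvG
theorem pvA_core (xs : List Int) : ∀ (s : Int), 0 ≤ s → ∀ (active c s0 s1 : Int), 0 ≤ c →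
    active = PySem.Int.mod (c + PySem.Int.floordiv s 6) 2 →
    (let r := (PySem.List.enumerate xs s).foldl (fun st p => pvStepA st p.1 p.2) (active, [s0, s1])
     PySem.List.pyGetD r.2 0 0 - PySem.List.pyGetD r.2 1 0) = (s0 - s1) + pvG s c xs := by
  induction xs with
  | nil =>
    intro s hs active c s0 s1 hc hact
    simp [PySem.List.enumerate_nil, PySem.List.pyGetD, PySem.List.pyGet?, PySem.List.pyIdx?, pvG]
  | cons x xs ih =>
    intro s hs active c s0 s1 hc hact
    have m2 : ∀ a : Int, PySem.Int.mod a 2 = a % 2 := fun a => PySem.Int.mod_eq_emod_of_pos (by norm_num)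
    have m6 : ∀ a : Int, PySem.Int.mod a 6 = a % 6 := fun a => PySem.Int.mod_eq_emod_of_pos (by norm_num)
    have d6 : ∀ a : Int, PySem.Int.floordiv a 6 = a / 6 := fun a => PySem.Int.floordiv_eq_ediv_of_pos (by norm_num)
    have bx : ∀ a : Int, a = 0 ∨ a = 1 → PySem.Int.bxor a 1 = 1 - a := by rintro a (rfl | rfl) <;> decide
    have ha01 : active = 0 ∨ active = 1 := by rw [hact, m2]; omega
    set c' := c + PySem.Int.band x 1 with hc'
    have hb01 : PySem.Int.band x 1 = 0 ∨ PySem.Int.band x 1 = 1 := by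
      rw [PySem.Int.band_one, m2]; omega
    have hc'nn : 0 ≤ c' := by rcases hb01 with h | h <;> omega
    set a1 := if PySem.Int.band x 1 ≠ 0 then PySem.Int.bxor active 1 else active with ha1def
    have ha1v : a1 = PySem.Int.mod (c' + PySem.Int.floordiv s 6) 2 := by
      rw [ha1def, hc']
      simp only [m2, d6] at hact ⊢
      rcases hb01 with h | h <;>
        simp only [h, ne_eq, not_true_eq_false, if_false, bx active ha01] <;> omega
    have ha1 : a1 = 0 ∨ a1 = 1 := by rw [ha1v, m2]; omega
    set active2 := if PySem.Int.mod (s + 1) 6 = 0 then PySem.Int.bxor a1 1 else a1 with hact2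
    have hA2 : active2 = PySem.Int.mod (c' + PySem.Int.floordiv (s + 1) 6) 2 := by
      rw [hact2]
      simp only [m2, m6, d6] at ha1v ⊢
      by_cases h6 : (s + 1) % 6 = 0 <;>
        simp only [h6, ite_true, ite_false, bx a1 ha1] <;> omega
    have ha201 : active2 = 0 ∨ active2 = 1 := by rw [hA2, m2]; omega
    have hsgn : (-1 : Int) ^ (c' + PySem.Int.floordiv (s + 1) 6).toNat =
        if active2 = 0 then 1 else -1 := by
      rw [pv_sign_of_nonneg _ (by rw [d6]; omega), ← hA2]
    simp only [PySem.List.enumerate_cons, List.foldl_cons]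
    have hstepA : pvStepA (active, [s0, s1]) s x =
        (active2, if active2 = 0 then [s0 + x, s1] else [s0, s1 + x]) := by
      show (active2, PySem.List.pySetD [s0, s1] active2 (PySem.List.pyGetD [s0, s1] active2 0 + x)) = _
      rcases ha201 with h | h <;>
        simp [h, PySem.List.pySetD, PySem.List.pySet?, PySem.List.pyGetD, PySem.List.pyGet?, PySem.List.pyIdx?]
    rw [hstepA]
    rcases ha201 with h | h <;> rw [h] at hA2 hsgn <;> norm_num at hsgn <;>
      simp only [h, ite_true, ite_false, one_ne_zero] <;>
      rw [ih (s + 1) (by omega) _ _ _ _ hc'nn hA2, pvG, ← hc', d6 (s + 1), hsgn] <;> ring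

-- B-side stage 1: the foldl builds pvPrefAux
theorem pvPref_build (xs : List Int) : ∀ (c : Int) (acc : List Int),
    (xs.foldl (fun (st : Int × List Int) x =>
      (st.1 + PySem.Int.band x 1, st.2 ++ [st.1 + PySem.Int.band x 1])) (c, acc)).2
      = acc ++ pvPrefAux c xs := by
  induction xs with
  | nil => intro c acc; simp [pvPrefAux]
  | cons x xs ih => intro c acc; simp [List.foldl_cons, ih, pvPrefAux]

-- B-side stage 2: the indexed signed sum equals pvG
theorem pvB_core (xs : List Int) : ∀ (s c : Int), 0 ≤ s → 0 ≤ c →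
    ((List.range xs.length).map (fun k => xs.getD k 0 *
      (-1 : Int) ^ ((pvPrefAux c xs).getD k 0 + PySem.Int.floordiv (s + (k : Int) + 1) 6).toNat)).sum
      = pvG s c xs := by
  induction xs with
  | nil => intro s c _ _; simp [pvG]
  | cons x xs ih =>
    intro s c hs hc
    have hb01 : PySem.Int.band x 1 = 0 ∨ PySem.Int.band x 1 = 1 := by
      rw [PySem.Int.band_one, PySem.Int.mod_eq_emod_of_pos (by norm_num)]; omega
    rw [List.length_cons, List.range_succ_eq_map, List.map_cons, List.map_map, List.sum_cons, pvG]
    congr 1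
    · simp [pvPrefAux]
    · rw [← ih (s + 1) (c + PySem.Int.band x 1) (by omega) (by rcases hb01 with h | h <;> omega)]
      apply congrArg
      apply List.map_congr_left
      intro k _
      simp only [Function.comp_apply, pvPrefAux, List.getD_cons_succ]
      congr 3
      push_cast
      ring

theorem scoreDifference_spec : Claim_equal_scoreDifference := by
  intro A _
  show scoreDifference A = scoreDifference_alt A
  unfold scoreDifference scoreDifference_alt
  simp only []
  rw [pvPref_build A 0 []]
  simp only [List.nil_append]
  -- A side: index loop → enumerate fold → pvA_core
  have eA : (PySem.List.pyRange 0 (PySem.List.len A) 1).foldl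
      (fun st i => pvStepA st i (PySem.List.pyGetD A i 0)) ((0 : Int), [(0 : Int), 0])
      = (PySem.List.enumerate A 0).foldl (fun st p => pvStepA st p.1 p.2) (0, [0, 0]) := by
    rw [PySem.List.enumerate_eq_map_pyRange (d := 0), List.foldl_map]
  have hA := pvA_core A 0 (by omega) 0 0 0 0 (by omega) (by decide)
  simp only at hA
  rw [eA, hA]
  -- B side: range fold of += → sum of map → pvB_core
  have hB : (PySem.List.pyRange 0 (PySem.List.len A) 1).foldl
      (fun acc i => acc + PySem.List.pyGetD A i 0 *
        (-1 : Int) ^ (PySem.List.pyGetD (pvPrefAux 0 A) i 0 + PySem.Int.floordiv (i + 1) 6).toNat) 0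
      = pvG 0 0 A := by
    rw [PySem.List.pyRange_one]
    rw [List.foldl_map]
    have hlen : ((PySem.List.len A - 0).toNat) = A.length := by
      simp [PySem.List.len]
    rw [hlen]
    have hsum : ∀ (l : List Nat) (init : Int),
        l.foldl (fun acc k => acc + A.getD k 0 *
          (-1 : Int) ^ ((pvPrefAux 0 A).getD k 0 + PySem.Int.floordiv ((0 : Int) + (k : Int) + 1) 6).toNat) init
        = init + (l.map (fun k => A.getD k 0 *
          (-1 : Int) ^ ((pvPrefAux 0 A).getD k 0 + PySem.Int.floordiv ((0 : Int) + (k : Int) + 1) 6).toNat)).sum := by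
      intro l
      induction l with
      | nil => intro init; simp
      | cons y l ihl =>
        intro init
        rw [List.foldl_cons, ihl, List.map_cons, List.sum_cons]; ring
    have := hsum (List.range A.length) 0
    simp only [PySem.List.pyGetD_natCast, zero_add] at this ⊢
    rw [this]
    have := pvB_core A 0 0 (by omega) (by omega)
    simp only [zero_add] at this
    rw [this]
  rw [hB]
  simp
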